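-- pv_equiv track=rewrite | github.com/YerongLi/dive | hackerrank/+amazon/determine_the_volumes_you_would_purchase_each_day/main.py | solution
-- ===== SOURCE A (Python) =====
-- def solution(volumes):
-- 	n = len(volumes)
-- 	vis = [0] * (n + 1)
-- 	ans = []
-- 	l, r = 1, 0
-- 	lll = [i for i in range(n + 1)]
-- 	for x in volumes:
-- 		vis[x] = 1
-- 		while r + 1 <= n and vis[r + 1]:
-- 			r+= 1
-- 		if l <= r:
-- 			ans.append(lll[l: r+1])
-- 			l = r + 1
-- 		else:
-- 			ans.append([-1])
-- 	return ans
-- ===== SOURCE B (Python) =====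
-- def solution(volumes):
--     n = len(volumes)
--     # first_day[v] = 1-based day on which value v is first seen (0 = never);
--     # indexing with the raw value keeps Python's list-index semantics.
--     first_day = [0] * (n + 1)
--     for day, x in enumerate(volumes, 1):
--         if first_day[x] == 0:
--             first_day[x] = day
--     # D[v-1] = day on which value v is purchased = prefix max of first_day,
--     # stopping at the first value never seen.
--     D = []
--     d = 0
--     for v in range(1, n + 1):
--         if first_day[v] == 0:
--             break
--         d = max(d, first_day[v])
--         D.append(d)
--     # one contiguous group of values per distinct day; all other days get [-1]
--     ans = [[-1] for _ in range(n)]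
--     lo = 1
--     for v in range(2, len(D) + 1):
--         if D[v - 1] != D[lo - 1]:
--             ans[D[lo - 1] - 1] = list(range(lo, v))
--             lo = v
--     if D:
--         ans[D[lo - 1] - 1] = list(range(lo, len(D) + 1))
--     return ans
-- ===== Notes on version B (the rewrite author's own statement) =====
-- stated objective: alternative
-- what changed: A interleaves a two-pointer sweep (l, r with an inner while) with the day loop and slices a prebuilt index list per day; B instead makes two value-indexed passes: it records each value's first-seen day, then walks values 1..n with a running prefix-max to assign each value its purchase day, finally writing one contiguous range per distinct day into an answer prefilled with the no-purchase marker.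
import Mathlib
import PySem

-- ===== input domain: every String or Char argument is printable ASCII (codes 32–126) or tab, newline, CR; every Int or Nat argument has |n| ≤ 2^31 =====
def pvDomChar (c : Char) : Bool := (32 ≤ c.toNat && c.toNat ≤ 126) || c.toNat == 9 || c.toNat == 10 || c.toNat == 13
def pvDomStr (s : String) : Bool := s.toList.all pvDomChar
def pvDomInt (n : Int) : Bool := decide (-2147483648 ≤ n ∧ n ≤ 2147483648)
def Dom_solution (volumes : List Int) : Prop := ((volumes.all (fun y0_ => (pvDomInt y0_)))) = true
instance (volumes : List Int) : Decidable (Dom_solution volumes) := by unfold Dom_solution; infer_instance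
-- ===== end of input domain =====

-- B replaces A's per-day two-pointer sweep by two passes (first-seen days, then a
-- prefix-max grouping of values into days); same cost class, objective: alternative.

-- ===== PORT A =====
-- the 'while r + 1 <= n and vis[r + 1]: r += 1' loop
def solAdvance (vis : List Int) (n r : Int) : Int :=
  if h : r + 1 ≤ n ∧ PySem.List.pyGetD vis (r + 1) 0 ≠ 0 then
    solAdvance vis n (r + 1)
  else r
termination_by (n - r).toNat
decreasing_by omega

-- one iteration of A's 'for x in volumes' loop, state (vis, ans, l, r)
def solStep (n : Int) (lll : List Int) (st : List Int × List (List Int) × Int × Int) (x : Int) :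
    List Int × List (List Int) × Int × Int :=
  match st with
  | (vis, ans, l, r0) =>
    let vis' := PySem.List.pySetD vis x 1
    let r := solAdvance vis' n r0
    if l ≤ r then (vis', ans ++ [PySem.List.slice lll (some l) (some (r + 1))], r + 1, r)
    else (vis', ans ++ [[-1]], l, r)

def solution (volumes : List Int) : List (List Int) :=
  let n := PySem.List.len volumes
  let vis := PySem.List.pyRepeat [(0 : Int)] (n + 1)
  let lll := PySem.List.pyRange 0 (n + 1) 1
  ((volumes.foldl (solStep n lll) (vis, [], 1, 0)).2.1)

-- ===== PORT B =====
-- B's second loop: 'for v in range(1, n+1): if first_day[v] == 0: break; d = max(d, first_day[v]); D.append(d)'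
def altDLoop (fd : List Int) : List Int → Int → List Int → List Int
  | [], _, D => D
  | v :: rest, d, D =>
    if PySem.List.pyGetD fd v 0 = 0 then D
    else altDLoop fd rest (max d (PySem.List.pyGetD fd v 0))
          (D ++ [max d (PySem.List.pyGetD fd v 0)])

-- B's grouping loop body, state (ans, lo)
def altGroupStep (D : List Int) (st : List (List Int) × Int) (v : Int) : List (List Int) × Int :=
  if PySem.List.pyGetD D (v - 1) 0 ≠ PySem.List.pyGetD D (st.2 - 1) 0 then
    (PySem.List.pySetD st.1 (PySem.List.pyGetD D (st.2 - 1) 0 - 1) (PySem.List.pyRange st.2 v 1), v)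
  else st

def solution_alt (volumes : List Int) : List (List Int) :=
  let n := PySem.List.len volumes
  let fd := (PySem.List.enumerate volumes 1).foldl
      (fun fd p => if PySem.List.pyGetD fd p.2 0 = 0 then PySem.List.pySetD fd p.2 p.1 else fd)
      (PySem.List.pyRepeat [(0 : Int)] (n + 1))
  let D := altDLoop fd (PySem.List.pyRange 1 (n + 1) 1) 0 []
  let ans0 := (PySem.List.pyRange 0 n 1).map (fun _ => [(-1 : Int)])
  let st := (PySem.List.pyRange 2 (PySem.List.len D + 1) 1).foldl (altGroupStep D) (ans0, 1)
  if D = [] then st.1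
  else PySem.List.pySetD st.1 (PySem.List.pyGetD D (st.2 - 1) 0 - 1)
        (PySem.List.pyRange st.2 (PySem.List.len D + 1) 1)

-- ===== PRECONDITION & SPEC =====
-- Pre_ excludes exactly the inputs where A raises IndexError: an element whose value
-- lies outside the index range that the vis list of length n+1 accepts.
def Pre_solution (volumes : List Int) : Prop :=
  ∀ x ∈ volumes, -((volumes.length : Int) + 1) ≤ x ∧ x ≤ (volumes.length : Int)
instance (volumes : List Int) : Decidable (Pre_solution volumes) := by
  unfold Pre_solution; infer_instance

def pvWitness_solution : List Int := [2, -4, 1, 2]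

def Spec_solution (volumes : List Int) (out : List (List Int)) : Prop := out = solution_alt volumes
instance (volumes : List Int) (out : List (List Int)) : Decidable (Spec_solution volumes out) := by
  unfold Spec_solution; infer_instance

-- ===== CLAIM (what is proved, stated in full; the proofs are below) =====
def Claim_equal_solution : Prop :=
  ∀ (volumes : List Int), Dom_solution volumes → Pre_solution volumes →
    Spec_solution volumes (solution volumes)

-- ===== LEMMAS AND PROOFS =====

-- ---- mathematical model (proof-only helpers) ----

-- Python's index normalisation for a list of length n+1
def wI (n : Nat) (x : Int) : Int := if x < 0 then x + n + 1 else x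

-- the wrapped values of a prefix of volumes
def wmap (n : Nat) (p : List Int) : List Int := p.map (wI n)

def seenB (s : List Int) (v : Nat) : Bool := decide ((v : Int) ∈ s)

def visL (n : Nat) (s : List Int) : List Int :=
  (List.range (n + 1)).map (fun v => if seenB s v then (1 : Int) else 0)

def fdI (s : List Int) (v : Int) : Int :=
  match s.idxOf? v with
  | some k => (k : Int) + 1
  | none => 0

def fdL (n : Nat) (s : List Int) : List Int :=
  (List.range (n + 1)).map (fun v : Nat => fdI s (v : Int))

def climbN (S : Nat → Bool) (n r : Nat) : Nat :=
  if h : r < n ∧ S (r + 1) then climbN S n (r + 1) else r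
termination_by n - r
decreasing_by omega

-- A's pointer r after the days whose wrapped values are s
def reachP (n : Nat) (s : List Int) : Nat := climbN (seenB s) n 0

-- day-indexed reach over the full wrapped list s
def reachT (n : Nat) (s : List Int) (d : Nat) : Nat := reachP n (s.take d)

-- the answer entry of day i+1
def Fday (n : Nat) (s : List Int) (i : Nat) : List Int :=
  if reachT n s (i + 1) = reachT n s i then [-1]
  else PySem.List.pyRange (reachT n s i + 1) (reachT n s (i + 1) + 1) 1

-- prefix max of first-seen days
def gI (s : List Int) : Nat → Int
  | 0 => 0
  | v + 1 => max (gI s v) (fdI s ((v : Int) + 1))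


theorem wI_bounds (n : Nat) (x : Int) (h1 : -((n : Int) + 1) ≤ x) (h2 : x ≤ n) :
    0 ≤ wI n x ∧ wI n x ≤ n := by
  unfold wI; split_ifs <;> omega

theorem getD_mapRange {α : Type} (M : Nat) (f : Nat → α) (i : Int) (dflt : α)
    (h0 : 0 ≤ i) (h : i < M) :
    PySem.List.pyGetD ((List.range M).map f) i dflt = f i.toNat := by
  rw [PySem.List.pyGetD_eq_getElem ((List.range M).map f) dflt h0 (by simpa using h)]
  simp

theorem getD_mapRange_wrap {α : Type} (n : Nat) (f : Nat → α) (x : Int) (dflt : α)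
    (h1 : -((n : Int) + 1) ≤ x) (h2 : x ≤ n) :
    PySem.List.pyGetD ((List.range (n + 1)).map f) x dflt = f (wI n x).toNat := by
  obtain ⟨hw0, hwn⟩ := wI_bounds n x h1 h2
  by_cases hx : 0 ≤ x
  · have : wI n x = x := by unfold wI; split_ifs <;> omega
    rw [this]; exact getD_mapRange _ _ _ _ hx (by omega)

  · -- negative index wraps
    have hx' : x < 0 := by omega
    have hk : x = -(((-x).toNat : Nat) : Int) := by omega
    rw [hk, PySem.List.pyGetD_neg_natCast _ _ _ (by omega) (by simp; omega)]
    simp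
    congr 1
    unfold wI; split_ifs <;> omega

theorem setD_neg {α : Type} (xs : List α) (i : Int) (v : α)
    (hneg : i < 0) (h : -(xs.length : Int) ≤ i) :
    PySem.List.pySetD xs i v = xs.set (xs.length - (-i).toNat) v := by
  simp [PySem.List.pySetD, PySem.List.pySet?, PySem.List.pyIdx?]
  split_ifs <;> first | omega | rfl

theorem set_mapRange {α : Type} (M : Nat) (f : Nat → α) (j : Nat) (v : α) :
    ((List.range M).map f).set j v = (List.range M).map (fun u => if u = j then v else f u) := by
  apply List.ext_getElem (by simp)
  intro k h1 h2
  simp only [List.getElem_set, List.getElem_map, List.getElem_range]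
  by_cases hk : k = j <;> simp [hk]
  intro h; omega

theorem setD_mapRange_wrap {α : Type} (n : Nat) (f : Nat → α) (x : Int) (v : α)
    (h1 : -((n : Int) + 1) ≤ x) (h2 : x ≤ n) :
    PySem.List.pySetD ((List.range (n + 1)).map f) x v
      = (List.range (n + 1)).map (fun u => if u = (wI n x).toNat then v else f u) := by
  obtain ⟨hw0, hwn⟩ := wI_bounds n x h1 h2
  by_cases hx : 0 ≤ x
  · rw [PySem.List.pySetD_of_nonneg _ _ hx, set_mapRange]
    have : x.toNat = (wI n x).toNat := by unfold wI; split_ifs <;> omega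
    rw [this]
  · rw [setD_neg _ _ _ (by omega) (by simp; omega), set_mapRange]
    have hL : ((List.range (n+1)).map f).length = n + 1 := by simp
    rw [hL]
    have : (n + 1) - (-x).toNat = (wI n x).toNat := by unfold wI; split_ifs <;> omega
    rw [this]

theorem climb_ge (S : Nat → Bool) (n r : Nat) : r ≤ climbN S n r := by
  induction r using climbN.induct (S := S) (n := n)
  next r h ih => rw [climbN, dif_pos h]; omega
  next r h => rw [climbN, dif_neg h]

theorem climb_le (S : Nat → Bool) (n r : Nat) : r ≤ n → climbN S n r ≤ n := by
  induction r using climbN.induct (S := S) (n := n)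
  next r hc ih => intro _; rw [climbN, dif_pos hc]; exact ih (by omega)
  next r hc => intro h; rw [climbN, dif_neg hc]; omega

theorem climb_seen (S : Nat → Bool) (n r : Nat) :
    ∀ v, r < v → v ≤ climbN S n r → S v = true := by
  induction r using climbN.induct (S := S) (n := n)
  next r hc ih =>
    intro v h1 h2
    rw [climbN, dif_pos hc] at h2
    by_cases hv : v = r + 1
    · subst hv; exact hc.2
    · exact ih v (by omega) h2
  next r hc =>
    intro v h1 h2
    rw [climbN, dif_neg hc] at h2; omega

theorem climb_stop (S : Nat → Bool) (n r : Nat) :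
    climbN S n r < n → S (climbN S n r + 1) = false := by
  induction r using climbN.induct (S := S) (n := n)
  next r hc ih => rw [climbN, dif_pos hc]; exact ih
  next r hc =>
    intro h
    rw [climbN, dif_neg hc] at h ⊢
    rw [Classical.not_and_iff_not_or_not] at hc
    rcases hc with hc | hc
    · omega
    · simpa using hc

theorem climb_max (S : Nat → Bool) (n r : Nat) :
    ∀ s, s ≤ n → r ≤ s → (∀ v, r < v → v ≤ s → S v = true) → s ≤ climbN S n r := by
  induction r using climbN.induct (S := S) (n := n)
  next r hc ih =>
    intro s hs hrs hall
    rw [climbN, dif_pos hc]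
    by_cases h : r + 1 ≤ s
    · exact ih s hs h (fun v h1 h2 => hall v (by omega) h2)
    · have := climb_ge S n (r + 1); omega
  next r hc =>
    intro s hs hrs hall
    rw [climbN, dif_neg hc]
    rw [Classical.not_and_iff_not_or_not] at hc
    rcases hc with hc | hc
    · omega
    · by_cases h : r + 1 ≤ s
      · have := hall (r + 1) (by omega) h; simp [this] at hc
      · omega

theorem climb_from_zero (S : Nat → Bool) (n r : Nat) (hr : r ≤ n)
    (hall : ∀ v, 1 ≤ v → v ≤ r → S v = true) : climbN S n r = climbN S n 0 := by
  have h1 : climbN S n r ≤ climbN S n 0 := by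
    apply climb_max S n 0 _ (climb_le S n r hr) (by omega)
    intro v hv1 hv2
    by_cases h : v ≤ r
    · exact hall v (by omega) h
    · exact climb_seen S n r v (by omega) hv2
  have h0 : r ≤ climbN S n 0 := by
    apply climb_max S n 0 r hr (by omega)
    intro v hv1 hv2; exact hall v (by omega) hv2
  have h2 : climbN S n 0 ≤ climbN S n r := by
    apply climb_max S n r _ (climb_le S n 0 (by omega)) h0
    intro v hv1 hv2; exact climb_seen S n 0 v (by omega) hv2
  omega

theorem mem_take_mono {x : Int} {s : List Int} {d e : Nat} (hde : d ≤ e)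
    (h : x ∈ s.take d) : x ∈ s.take e := by
  have : s.take d = (s.take e).take d := by rw [List.take_take]; congr 1; omega
  rw [this] at h
  exact (List.take_prefix d (s.take e)).subset h

theorem reach_le (n : Nat) (s : List Int) (d : Nat) : reachT n s d ≤ n :=
  climb_le _ n 0 (by omega)

theorem reach_seen (n : Nat) (s : List Int) (d : Nat) :
    ∀ v, 1 ≤ v → v ≤ reachT n s d → seenB (s.take d) v = true :=
  fun v h1 h2 => climb_seen _ n 0 v (by omega) h2

theorem reach_stop (n : Nat) (s : List Int) (d : Nat) (h : reachT n s d < n) :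
    seenB (s.take d) (reachT n s d + 1) = false :=
  climb_stop _ n 0 h

theorem reach_max (n : Nat) (s : List Int) (d w : Nat) (hw : w ≤ n)
    (hall : ∀ v, 1 ≤ v → v ≤ w → seenB (s.take d) v = true) : w ≤ reachT n s d :=
  climb_max _ n 0 w hw (by omega) (fun v h1 h2 => hall v (by omega) h2)

theorem reach_mono (n : Nat) (s : List Int) {d e : Nat} (hde : d ≤ e) :
    reachT n s d ≤ reachT n s e := by
  apply reach_max n s e _ (reach_le n s d)
  intro v h1 h2
  have := reach_seen n s d v h1 h2
  simp only [seenB, decide_eq_true_eq] at this ⊢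
  exact mem_take_mono hde this

theorem reach_le_full (n : Nat) (s : List Int) (d : Nat) :
    reachT n s d ≤ reachT n s s.length := by
  apply reach_max n s s.length _ (reach_le n s d)
  intro v h1 h2
  have := reach_seen n s d v h1 h2
  simp only [seenB, decide_eq_true_eq] at this ⊢
  rw [List.take_length] at *
  exact (List.take_prefix d s).subset this

theorem fd_le_len (s : List Int) (v : Int) : fdI s v ≤ s.length := by
  unfold fdI
  rcases h : s.idxOf? v with _ | k
  · simp
  · have h' : PySem.List.index? s v = some k := by
      rw [PySem.List.index?_eq_idxOf?]; exact h
    obtain ⟨hk, -, -⟩ := PySem.List.getElem_of_index?_eq_some h'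
    simp; omega

theorem fd_zero_iff (s : List Int) (v : Int) : fdI s v = 0 ↔ v ∉ s := by
  unfold fdI
  rcases h : s.idxOf? v with _ | k
  · have h' : PySem.List.index? s v = none := by rw [PySem.List.index?_eq_idxOf?]; exact h
    rw [PySem.List.index?_eq_none_iff] at h'
    simp [h']
  · have h' : PySem.List.index? s v = some k := by rw [PySem.List.index?_eq_idxOf?]; exact h
    have hm : v ∈ s := by
      obtain ⟨hk, he, -⟩ := PySem.List.getElem_of_index?_eq_some h'
      exact he ▸ List.getElem_mem hk
    simp [hm]
    omega

theorem seen_take_iff_fd (s : List Int) (v : Int) (d : Nat) :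
    v ∈ s.take d ↔ 1 ≤ fdI s v ∧ fdI s v ≤ d := by
  unfold fdI
  rcases h : s.idxOf? v with _ | k
  · have h' : PySem.List.index? s v = none := by rw [PySem.List.index?_eq_idxOf?]; exact h
    rw [PySem.List.index?_eq_none_iff] at h'
    simp
    intro hmem
    exact absurd ((List.take_prefix d s).subset hmem) h'
  · have h' : PySem.List.index? s v = some k := by rw [PySem.List.index?_eq_idxOf?]; exact h
    obtain ⟨hk, he, hmin⟩ := PySem.List.getElem_of_index?_eq_some h'
    simp only []
    constructor
    · intro hmem
      obtain ⟨j, hj, hje⟩ := List.mem_iff_getElem.1 hmem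
      have hjlen : j < s.length := by
        have := hj; simp [List.length_take] at this; omega
      have hjd : j < d := by have := hj; simp [List.length_take] at this; omega
      have hsj : s[j] = v := by rw [← hje]; simp [List.getElem_take]
      have hkj : k ≤ j := by
        by_contra hlt
        exact hmin j (by omega) hsj
      constructor <;> omega
    · rintro ⟨-, hkd⟩
      have hkd' : k < d := by omega
      have : (s.take d)[k]'(by simp [List.length_take]; omega) = v := by
        simp [List.getElem_take, he]
      exact this ▸ List.getElem_mem _

theorem g_mono (s : List Int) {u v : Nat} (h : u ≤ v) : gI s u ≤ gI s v := by
  induction v with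
  | zero =>
    have hu : u = 0 := by omega
    subst hu; exact le_refl _
  | succ v ih =>
    by_cases hu : u = v + 1
    · subst hu; omega
    · have : gI s u ≤ gI s v := ih (by omega)
      simp only [gI]; omega

theorem g_le_iff (s : List Int) (v : Nat) (d : Int) (hd : 0 ≤ d) :
    gI s v ≤ d ↔ ∀ u : Nat, 1 ≤ u → u ≤ v → fdI s (u : Int) ≤ d := by
  induction v with
  | zero => simp [gI, hd]; omega
  | succ v ih =>
    simp only [gI, max_le_iff, ih]
    constructor
    · rintro ⟨h1, h2⟩ u hu1 hu2
      by_cases hu : u = v + 1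
      · subst hu; simpa using h2
      · exact h1 u hu1 (by omega)
    · intro h
      refine ⟨fun u hu1 hu2 => h u hu1 (by omega), ?_⟩
      have := h (v + 1) (by omega) (by omega)
      push_cast at this ⊢
      exact this

theorem seenB_take_iff_fd (s : List Int) (v : Nat) (d : Nat) :
    seenB (s.take d) v = true ↔ 1 ≤ fdI s (v : Int) ∧ fdI s (v : Int) ≤ d := by
  simp only [seenB, decide_eq_true_eq]
  exact seen_take_iff_fd s v d

theorem fd_pos_of_le_full (n : Nat) (s : List Int) (v : Nat) (h1 : 1 ≤ v)
    (h2 : v ≤ reachT n s s.length) :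
    1 ≤ fdI s (v : Int) ∧ fdI s (v : Int) ≤ s.length := by
  have := reach_seen n s s.length v h1 h2
  exact (seenB_take_iff_fd s v s.length).1 this

theorem g_le_iff_reach (n : Nat) (s : List Int) (d v : Nat) (_hv1 : 1 ≤ v)
    (hvm : v ≤ reachT n s s.length) :
    gI s v ≤ (d : Int) ↔ v ≤ reachT n s d := by
  rw [g_le_iff s v d (by omega)]
  constructor
  · intro h
    apply reach_max n s d v (le_trans hvm (reach_le n s s.length))
    intro u hu1 hu2
    have hum : u ≤ reachT n s s.length := le_trans hu2 hvm
    have hfd := fd_pos_of_le_full n s u hu1 hum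
    exact (seenB_take_iff_fd s u d).2 ⟨hfd.1, h u hu1 hu2⟩
  · intro h u hu1 hu2
    have : seenB (s.take d) u = true := reach_seen n s d u hu1 (le_trans hu2 h)
    exact ((seenB_take_iff_fd s u d).1 this).2

theorem g_eq_iff_reach (n : Nat) (s : List Int) (d v : Nat) (hd : 1 ≤ d) (hv1 : 1 ≤ v)
    (hvm : v ≤ reachT n s s.length) :
    gI s v = (d : Int) ↔ reachT n s (d - 1) < v ∧ v ≤ reachT n s d := by
  have h1 := g_le_iff_reach n s d v hv1 hvm
  have h2 := g_le_iff_reach n s (d - 1) v hv1 hvm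
  have hc : ((d - 1 : Nat) : Int) = (d : Int) - 1 := by omega
  rw [hc] at h2
  omega

theorem no_jump (n : Nat) (s : List Int) (e : Nat) (he : 1 ≤ e)
    (h : ∀ v : Nat, 1 ≤ v → v ≤ reachT n s s.length → gI s v ≠ (e : Int)) :
    reachT n s e = reachT n s (e - 1) := by
  by_contra hne
  have hmono := reach_mono n s (show e - 1 ≤ e by omega)
  have hlt : reachT n s (e - 1) < reachT n s e := by omega
  set v := reachT n s e with hv
  have hv1 : 1 ≤ v := by omega
  have hvm : v ≤ reachT n s s.length := reach_le_full n s e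
  exact h v hv1 hvm ((g_eq_iff_reach n s e v he hv1 hvm).2 ⟨hlt, le_refl _⟩)

-- ---- A-side ----

theorem visL_nil (n : Nat) : visL n [] = PySem.List.pyRepeat [(0 : Int)] ((n : Int) + 1) := by
  have : ((n : Int) + 1) = ((n + 1 : Nat) : Int) := by omega
  rw [this, PySem.List.pyRepeat_singleton]
  simp only [Int.toNat_natCast]
  apply List.ext_getElem (by simp [visL])
  intro k h1 h2
  simp [visL, seenB]

theorem reachP_nil (n : Nat) : reachP n [] = 0 := by
  unfold reachP
  rw [climbN, dif_neg]
  simp [seenB]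

theorem solAdvance_eq (n : Nat) (t : List Int) (r : Nat) :
    solAdvance (visL n t) (n : Int) (r : Int) = ((climbN (seenB t) n r : Nat) : Int) := by
  induction r using climbN.induct (S := seenB t) (n := n)
  next r hc ih =>
    rw [climbN, dif_pos hc, ← ih, solAdvance, dif_pos]
    · norm_num
    constructor
    · omega
    · have : PySem.List.pyGetD (visL n t) ((r : Int) + 1) 0
          = (if seenB t (r + 1) then (1 : Int) else 0) := by
        have h1 : ((r : Int) + 1) = ((r + 1 : Nat) : Int) := by omega
        rw [h1, visL, getD_mapRange _ _ _ _ (by omega) (by omega)]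
        simp
      rw [this, if_pos hc.2]
      omega
  next r hc =>
    rw [climbN, dif_neg hc, solAdvance, dif_neg]
    intro ⟨ha, hb⟩
    apply hc
    have hrn : r < n := by omega
    refine ⟨hrn, ?_⟩
    have : PySem.List.pyGetD (visL n t) ((r : Int) + 1) 0
        = (if seenB t (r + 1) then (1 : Int) else 0) := by
      have h1 : ((r : Int) + 1) = ((r + 1 : Nat) : Int) := by omega
      rw [h1, visL, getD_mapRange _ _ _ _ (by omega) (by omega)]
      simp
    rw [this] at hb
    by_contra hS
    simp [hS] at hb

theorem slice_pyRange (M : Nat) (a b : Nat) (hab : a ≤ b) (hb : b ≤ M) :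
    PySem.List.slice (PySem.List.pyRange 0 (M : Int) 1) (some (a : Int)) (some (b : Int))
      = PySem.List.pyRange (a : Int) (b : Int) 1 := by
  rw [PySem.List.slice_natCast]
  have h1 : PySem.List.pyRange 0 (M : Int) 1
      = PySem.List.pyRange 0 (a : Int) 1 ++ PySem.List.pyRange (a : Int) (M : Int) 1 :=
    PySem.List.pyRange_one_append _ _ _ (by omega) (by omega)
  have h2 : PySem.List.pyRange (a : Int) (M : Int) 1
      = PySem.List.pyRange (a : Int) (b : Int) 1 ++ PySem.List.pyRange (b : Int) (M : Int) 1 :=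
    PySem.List.pyRange_one_append _ _ _ (by omega) (by omega)
  have hla : (PySem.List.pyRange 0 (a : Int) 1).length = a := by
    rw [PySem.List.length_pyRange_one]; omega
  have hlb : (PySem.List.pyRange (a : Int) (b : Int) 1).length = b - a := by
    rw [PySem.List.length_pyRange_one]; omega
  have hd : (PySem.List.pyRange 0 (a : Int) 1 ++ PySem.List.pyRange (a : Int) (M : Int) 1).drop a
      = PySem.List.pyRange (a : Int) (M : Int) 1 := by
    have h := List.drop_left (l₁ := PySem.List.pyRange 0 (a : Int) 1)
      (l₂ := PySem.List.pyRange (a : Int) (M : Int) 1)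
    rwa [hla] at h
  have ht : (PySem.List.pyRange (a : Int) (b : Int) 1 ++ PySem.List.pyRange (b : Int) (M : Int) 1).take (b - a)
      = PySem.List.pyRange (a : Int) (b : Int) 1 := by
    have h := List.take_left (l₁ := PySem.List.pyRange (a : Int) (b : Int) 1)
      (l₂ := PySem.List.pyRange (b : Int) (M : Int) 1)
    rwa [hlb] at h
  rw [h1, hd, h2, ht]

theorem visL_update (n : Nat) (t : List Int) (x : Int)
    (h1 : -((n : Int) + 1) ≤ x) (h2 : x ≤ n) :
    PySem.List.pySetD (visL n t) x 1 = visL n (t ++ [wI n x]) := by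
  obtain ⟨hw0, hwn⟩ := wI_bounds n x h1 h2
  rw [visL, setD_mapRange_wrap n _ x 1 h1 h2]
  apply List.map_congr_left
  intro u hu
  simp only [List.mem_range] at hu
  by_cases he : u = (wI n x).toNat
  · subst he
    have : seenB (t ++ [wI n x]) (wI n x).toNat = true := by
      simp [seenB]
      right
      omega
    simp [this]
  · have : seenB (t ++ [wI n x]) u = seenB t u := by
      simp [seenB]
      intro hux
      exfalso
      apply he
      omega
    simp [this]
    exact fun h => absurd h he

theorem wmap_append (n : Nat) (p q : List Int) :
    wmap n (p ++ q) = wmap n p ++ wmap n q := by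
  simp [wmap]

theorem wmap_take (n : Nat) (p q : List Int) :
    (wmap n (p ++ q)).take p.length = wmap n p := by
  rw [wmap_append]
  have h := List.take_left (l₁ := wmap n p) (l₂ := wmap n q)
  rwa [show (wmap n p).length = p.length by simp [wmap]] at h

theorem A_loop (volumes : List Int) (hpre : Pre_solution volumes) :
    ∀ (rest pre : List Int), volumes = pre ++ rest →
    (rest.foldl
        (solStep ((volumes.length : Int)) (PySem.List.pyRange 0 ((volumes.length : Int) + 1) 1))
        (visL volumes.length (wmap volumes.length pre),
         (List.range pre.length).map (Fday volumes.length (wmap volumes.length volumes)),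
         ((reachT volumes.length (wmap volumes.length volumes) pre.length : Nat) : Int) + 1,
         ((reachT volumes.length (wmap volumes.length volumes) pre.length : Nat) : Int))).2.1
      = (List.range volumes.length).map (Fday volumes.length (wmap volumes.length volumes)) := by
  intro rest
  induction rest with
  | nil =>
    intro pre hsplit
    have : pre.length = volumes.length := by simp [hsplit]
    simp [List.foldl_nil, this]
  | cons x rest' ih =>
    intro pre hsplit
    set n := volumes.length with hn
    set s := wmap volumes.length volumes with hs
    set d := pre.length with hd
    have hxmem : x ∈ volumes := by rw [hsplit]; simp
    obtain ⟨hx1, hx2⟩ := hpre x hxmem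
    obtain ⟨hw0, hwn⟩ := wI_bounds n x hx1 hx2
    have htake_d : s.take d = wmap n pre := by
      have h := wmap_take n pre (x :: rest')
      rw [← hsplit] at h
      exact h
    have htake_d1 : s.take (d + 1) = wmap n pre ++ [wI n x] := by
      have h2 := wmap_take n (pre ++ [x]) rest'
      rw [show pre ++ [x] ++ rest' = volumes by simp [hsplit]] at h2
      rw [show (pre ++ [x]).length = d + 1 by simp [hd]] at h2
      calc s.take (d + 1) = wmap n (pre ++ [x]) := h2
        _ = wmap n pre ++ [wI n x] := by rw [wmap_append]; rfl
    -- the new vis list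
    have hvis : PySem.List.pySetD (visL n (wmap n pre)) x 1 = visL n (wmap n pre ++ [wI n x]) :=
      visL_update n (wmap n pre) x hx1 hx2
    -- the advanced pointer
    have hreach1 : climbN (seenB (wmap n pre ++ [wI n x])) n (reachT n s d) = reachT n s (d + 1) := by
      rw [← htake_d1]
      apply climb_from_zero
      · exact reach_le n s d
      · intro v hv1 hv2
        have hseen := reach_seen n s d v hv1 hv2
        rw [htake_d] at hseen
        have : seenB (s.take (d+1)) v = true := by
          rw [htake_d1]
          simp only [seenB, decide_eq_true_eq] at hseen ⊢
          exact List.mem_append_left _ hseen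
        exact this
    have hadv : solAdvance (visL n (wmap n pre ++ [wI n x])) (n : Int)
          ((reachT n s d : Nat) : Int) = ((reachT n s (d + 1) : Nat) : Int) := by
      rw [solAdvance_eq n _ (reachT n s d), hreach1]
    have hmono : reachT n s d ≤ reachT n s (d + 1) := reach_mono n s (by omega)
    have hle1 : reachT n s (d + 1) + 1 ≤ n + 1 := by have := reach_le n s (d + 1); omega
    rw [List.foldl_cons]
    have hstep : solStep ((n : Int)) (PySem.List.pyRange 0 ((n : Int) + 1) 1)
          (visL n (wmap n pre),
           (List.range d).map (Fday n s),
           ((reachT n s d : Nat) : Int) + 1,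
           ((reachT n s d : Nat) : Int)) x
        = (visL n (wmap n pre ++ [wI n x]),
           (List.range (d + 1)).map (Fday n s),
           ((reachT n s (d + 1) : Nat) : Int) + 1,
           ((reachT n s (d + 1) : Nat) : Int)) := by
      rw [solStep, hvis, hadv]
      by_cases hj : reachT n s d + 1 ≤ reachT n s (d + 1)
      · rw [if_pos (by exact_mod_cast hj)]
        have hsl : PySem.List.slice (PySem.List.pyRange 0 ((n : Int) + 1) 1)
              (some (((reachT n s d : Nat) : Int) + 1))
              (some (((reachT n s (d + 1) : Nat) : Int) + 1))
            = Fday n s d := by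
          have hc1 : ((reachT n s d : Nat) : Int) + 1 = (((reachT n s d + 1 : Nat)) : Int) := by omega
          have hc2 : ((reachT n s (d + 1) : Nat) : Int) + 1 = (((reachT n s (d + 1) + 1 : Nat)) : Int) := by omega
          have hcM : ((n : Int) + 1) = (((n + 1 : Nat)) : Int) := by omega
          rw [hc1, hc2, hcM, slice_pyRange (n + 1) _ _ (by omega) (by omega)]
          rw [Fday, if_neg (by omega)]
          congr 1
        rw [hsl, List.range_succ, List.map_append, List.map_singleton]
      · rw [if_neg (by exact_mod_cast hj)]
        have heq : reachT n s (d + 1) = reachT n s d := by omega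
        have hF : Fday n s d = [-1] := by rw [Fday, if_pos heq]
        rw [List.range_succ, List.map_append, List.map_singleton, hF, heq]
    rw [hstep]
    have hsplit' : volumes = (pre ++ [x]) ++ rest' := by simp [hsplit]
    have := ih (pre ++ [x]) hsplit'
    rw [show (pre ++ [x]).length = d + 1 by simp [hd]] at this
    rw [show wmap n (pre ++ [x]) = wmap n pre ++ [wI n x] by rw [wmap_append]; rfl] at this
    exact this

theorem A_final (volumes : List Int) (hpre : Pre_solution volumes) :
    solution volumes
      = (List.range volumes.length).map (Fday volumes.length (wmap volumes.length volumes)) := by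
  have h0 := A_loop volumes hpre volumes [] (by simp)
  have hr0 : reachT volumes.length (wmap volumes.length volumes) 0 = 0 := by
    rw [reachT, List.take_zero, reachP_nil]
  simp only [List.length_nil, List.range_zero, List.map_nil] at h0
  rw [hr0, show wmap volumes.length [] = [] from rfl, visL_nil] at h0
  unfold solution
  simp only [PySem.List.len_eq]
  simpa using h0

-- ---- B-side ----

theorem fdI_nil (v : Int) : fdI [] v = 0 := by simp [fdI]

theorem fdI_append (t : List Int) (y v : Int) :
    fdI (t ++ [y]) v
      = if fdI t v ≠ 0 then fdI t v else (if v = y then (t.length : Int) + 1 else 0) := by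
  by_cases hm : v ∈ t
  · have h1 : PySem.List.index? (t ++ [y]) v = PySem.List.index? t v :=
      PySem.List.index?_append_of_mem [y] hm
    have h2 : fdI t v ≠ 0 := by rw [ne_eq, fd_zero_iff]; simpa using hm
    rw [if_pos h2]
    unfold fdI
    rw [PySem.List.index?_eq_idxOf?] at h1
    rw [PySem.List.index?_eq_idxOf?] at h1
    rw [h1]
  · have h2 : fdI t v = 0 := (fd_zero_iff t v).2 hm
    rw [if_neg (by simp [h2])]
    by_cases hy : v = y
    · subst hy
      have h1 : PySem.List.index? (t ++ [v]) v = some t.length :=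
        PySem.List.index?_append_singleton_self t v hm
      rw [PySem.List.index?_eq_idxOf?] at h1
      unfold fdI
      rw [h1]
      simp
    · have hnm : v ∉ t ++ [y] := by simp [hm, hy]
      have h1 : PySem.List.index? (t ++ [y]) v = none :=
        (PySem.List.index?_eq_none_iff _ _).2 hnm
      rw [PySem.List.index?_eq_idxOf?] at h1
      unfold fdI
      rw [h1]
      simp [hy]

theorem fdL_update (n : Nat) (t : List Int) (x : Int)
    (h1 : -((n : Int) + 1) ≤ x) (h2 : x ≤ n) :
    (if PySem.List.pyGetD (fdL n t) x 0 = 0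
      then PySem.List.pySetD (fdL n t) x ((t.length : Int) + 1)
      else fdL n t)
      = fdL n (t ++ [wI n x]) := by
  obtain ⟨hw0, hwn⟩ := wI_bounds n x h1 h2
  have hwc : ((wI n x).toNat : Int) = wI n x := by omega
  have hget : PySem.List.pyGetD (fdL n t) x 0 = fdI t (wI n x) := by
    rw [fdL, getD_mapRange_wrap n _ x 0 h1 h2, hwc]
  rw [hget]
  by_cases h0 : fdI t (wI n x) = 0
  · rw [if_pos h0, fdL, setD_mapRange_wrap n _ x _ h1 h2]
    apply List.map_congr_left
    intro u hu
    simp only [List.mem_range] at hu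
    by_cases he : u = (wI n x).toNat
    · subst he
      rw [if_pos rfl, fdI_append, hwc, if_neg (by simp [h0]), if_pos rfl]
    · rw [if_neg he, fdI_append]
      have hne : (u : Int) ≠ wI n x := by omega
      by_cases hz : fdI t (u : Int) = 0
      · rw [if_neg (by simp [hz]), if_neg hne, hz]
      · rw [if_pos hz]
  · rw [if_neg h0, fdL]
    apply List.map_congr_left
    intro u hu
    simp only [List.mem_range] at hu
    rw [fdI_append]
    by_cases he : (u : Int) = wI n x
    · rw [if_pos (by rwa [he])]
    · by_cases hz : fdI t (u : Int) = 0
      · rw [if_neg (by simp [hz]), if_neg he, hz]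
      · rw [if_pos hz]

theorem fdL_nil (n : Nat) : fdL n [] = PySem.List.pyRepeat [(0 : Int)] ((n : Int) + 1) := by
  have : ((n : Int) + 1) = ((n + 1 : Nat) : Int) := by omega
  rw [this, PySem.List.pyRepeat_singleton]
  simp only [Int.toNat_natCast]
  apply List.ext_getElem (by simp [fdL])
  intro k hk1 hk2
  simp [fdL, fdI_nil]

theorem B_fdloop (volumes : List Int) (hpre : Pre_solution volumes) :
    ∀ (rest pre : List Int), volumes = pre ++ rest →
    (PySem.List.enumerate rest ((pre.length : Int) + 1)).foldl
        (fun fd p => if PySem.List.pyGetD fd p.2 0 = 0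
          then PySem.List.pySetD fd p.2 p.1 else fd)
        (fdL volumes.length (wmap volumes.length pre))
      = fdL volumes.length (wmap volumes.length volumes) := by
  intro rest
  induction rest with
  | nil =>
    intro pre hsplit
    rw [PySem.List.enumerate_nil, List.foldl_nil, hsplit, List.append_nil]
  | cons x rest' ih =>
    intro pre hsplit
    set n := volumes.length with hn
    have hxmem : x ∈ volumes := by rw [hsplit]; simp
    obtain ⟨hx1, hx2⟩ := hpre x hxmem
    rw [PySem.List.enumerate_cons, List.foldl_cons]
    have hlen : (wmap n pre).length = pre.length := by simp [wmap]
    have hbody : (if PySem.List.pyGetD (fdL n (wmap n pre)) x 0 = 0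
          then PySem.List.pySetD (fdL n (wmap n pre)) x ((pre.length : Int) + 1)
          else fdL n (wmap n pre))
        = fdL n (wmap n pre ++ [wI n x]) := by
      have h := fdL_update n (wmap n pre) x hx1 hx2
      rwa [hlen] at h
    simp only [hbody]
    have hsplit' : volumes = (pre ++ [x]) ++ rest' := by simp [hsplit]
    have := ih (pre ++ [x]) hsplit'
    rw [show (pre ++ [x]).length = pre.length + 1 by simp] at this
    rw [show wmap n (pre ++ [x]) = wmap n pre ++ [wI n x] by rw [wmap_append]; rfl] at this
    rw [show ((pre.length + 1 : Nat) : Int) = (pre.length : Int) + 1 by omega] at this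
    exact this

theorem fd_zero_at_succ_full (n : Nat) (s : List Int) (_hlen : s.length = n)
    (h : reachT n s s.length < n) :
    fdI s ((reachT n s s.length : Nat) + 1 : Int) = 0 := by
  have hstop := reach_stop n s s.length h
  rw [List.take_length] at hstop
  simp only [seenB, decide_eq_false_iff_not] at hstop
  rw [show ((reachT n s s.length : Nat) + 1 : Int) = (((reachT n s s.length + 1 : Nat)) : Int) by omega]
  exact (fd_zero_iff _ _).2 hstop

theorem B_dloop (n : Nat) (s : List Int) (hlen : s.length = n) :
    ∀ (k v : Nat), reachT n s s.length + 1 - v = k → v ≤ reachT n s s.length →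
    altDLoop (fdL n s) (PySem.List.pyRange ((v : Int) + 1) ((n : Int) + 1) 1)
        (gI s v) ((List.range v).map (fun i => gI s (i + 1)))
      = (List.range (reachT n s s.length)).map (fun i => gI s (i + 1)) := by
  intro k
  induction k with
  | zero => intro v hk hv; omega
  | succ k ihk =>
    intro v hk hv
    set m := reachT n s s.length with hm
    by_cases hvm : v = m
    · -- the loop stops here
      by_cases hmn : m = n
      · rw [PySem.List.pyRange_one_eq_nil (by omega)]
        rw [altDLoop, hvm]
      · have hlt : m < n := lt_of_le_of_ne (hm ▸ hlen ▸ reach_le n s s.length) hmn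
        rw [PySem.List.pyRange_one_cons (by omega), altDLoop]
        have hget : PySem.List.pyGetD (fdL n s) ((v : Int) + 1) 0 = fdI s ((v : Int) + 1) := by
          rw [fdL, getD_mapRange _ _ _ _ (by omega) (by omega)]
          congr 1
        rw [if_pos]
        · rw [hvm]
        · rw [hget, hvm]
          exact fd_zero_at_succ_full n s hlen hlt
    · have hvlt : v < m := by omega
      have hmn : m ≤ n := by have := reach_le n s s.length; omega
      rw [PySem.List.pyRange_one_cons (by omega), altDLoop]
      have hget : PySem.List.pyGetD (fdL n s) ((v : Int) + 1) 0 = fdI s ((v : Int) + 1) := by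
        rw [fdL, getD_mapRange _ _ _ _ (by omega) (by omega)]
        congr 1
      have hfd : 1 ≤ fdI s ((v : Int) + 1) := by
        have := (fd_pos_of_le_full n s (v + 1) (by omega) (by omega)).1
        rwa [show (((v + 1 : Nat)) : Int) = (v : Int) + 1 by omega] at this
      rw [if_neg (by rw [hget]; omega)]
      have hmax : max (gI s v) (PySem.List.pyGetD (fdL n s) ((v : Int) + 1) 0) = gI s (v + 1) := by
        rw [hget]
        simp only [gI]
      rw [hmax]
      have hacc : (List.range v).map (fun i => gI s (i + 1)) ++ [gI s (v + 1)]
          = (List.range (v + 1)).map (fun i => gI s (i + 1)) := by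
        rw [List.range_succ, List.map_append, List.map_singleton]
      rw [hacc]
      have := ihk (v + 1) (by omega) (by omega)
      rw [show ((v + 1 : Nat) : Int) = (v : Int) + 1 by omega] at this
      exact this

-- ---- grouping pass ----

def partialAns (n : Nat) (s : List Int) (dcur : Int) : List (List Int) :=
  (List.range n).map (fun i : Nat => if ((i : Int) + 1 < dcur) then Fday n s i else [-1])

theorem g_ge_fd (s : List Int) (v : Nat) (hv : 1 ≤ v) : fdI s (v : Int) ≤ gI s v := by
  obtain ⟨u, rfl⟩ : ∃ u, v = u + 1 := ⟨v - 1, by omega⟩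
  simp only [gI]
  have : (((u + 1 : Nat)) : Int) = (u : Int) + 1 := by omega
  rw [this]
  exact le_max_right _ _

theorem g_pos (n : Nat) (s : List Int) (v : Nat) (hv : 1 ≤ v)
    (hvm : v ≤ reachT n s s.length) : 1 ≤ gI s v :=
  le_trans (fd_pos_of_le_full n s v hv hvm).1 (g_ge_fd s v hv)

theorem g_le_n (n : Nat) (s : List Int) (hlen : s.length = n) (v : Nat) : gI s v ≤ n := by
  rw [g_le_iff s v n (by omega)]
  intro u hu1 hu2
  have := fd_le_len s (u : Int)
  omega

theorem Fday_eq_neg1 (n : Nat) (s : List Int) (i : Nat)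
    (h : ∀ v : Nat, 1 ≤ v → v ≤ reachT n s s.length → gI s v ≠ (i : Int) + 1) :
    Fday n s i = [-1] := by
  rw [Fday, if_pos]
  have := no_jump n s (i + 1) (by omega)
      (fun v hv1 hv2 => by
        have := h v hv1 hv2
        rwa [show (((i + 1 : Nat)) : Int) = (i : Int) + 1 by omega])
  rw [this]
  congr 1

theorem getD_gList (n : Nat) (s : List Int) (m : Nat) (hm : m = reachT n s s.length)
    (v : Nat) (hv1 : 1 ≤ v) (hv2 : v ≤ m) :
    PySem.List.pyGetD ((List.range m).map (fun i : Nat => gI s (i + 1))) ((v : Int) - 1) 0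
      = gI s v := by
  have h1 : ((v : Int) - 1) = (((v - 1 : Nat)) : Int) := by omega
  rw [h1, getD_mapRange _ _ _ _ (by omega) (by omega)]
  simp only [Int.toNat_natCast]
  congr 1
  omega

theorem write_block (n : Nat) (s : List Int) (hlen : s.length = n)
    (m : Nat) (hm : m = reachT n s s.length) (lo v : Nat)
    (hlo1 : 1 ≤ lo) (hlov : lo < v) (hvm : v ≤ m + 1)
    (hblock : ∀ u, lo ≤ u → u < v → gI s u = gI s lo)
    (hleft : lo = 1 ∨ gI s (lo - 1) < gI s lo)
    (hright : v = m + 1 ∨ gI s lo < gI s v)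
    (dnew : Int) (hdnew : dnew = if v = m + 1 then (n : Int) + 1 else gI s v) :
    PySem.List.pySetD (partialAns n s (gI s lo)) (gI s lo - 1)
        (PySem.List.pyRange (lo : Int) (v : Int) 1)
      = partialAns n s dnew := by
  have hlom : lo ≤ m := by omega
  have hd1 : 1 ≤ gI s lo := g_pos n s lo hlo1 (by omega)
  have hdn : gI s lo ≤ n := g_le_n n s hlen lo
  set d0 := (gI s lo).toNat with hd0
  have hd0c : ((d0 : Nat) : Int) = gI s lo := by omega
  have hd01 : 1 ≤ d0 := by omega
  -- the reach interval of this block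
  have hlow : reachT n s (d0 - 1) = lo - 1 := by
    have h1 := (g_eq_iff_reach n s d0 lo hd01 hlo1 (by omega)).1 hd0c.symm
    by_cases hlo2 : lo = 1
    · subst hlo2; omega
    · have hg : gI s (lo - 1) < gI s lo := by
        rcases hleft with h | h
        · exact absurd h hlo2
        · exact h
      have h2 : lo - 1 ≤ reachT n s (d0 - 1) := by
        rw [← g_le_iff_reach n s (d0 - 1) (lo - 1) (by omega) (by omega)]
        have hc : ((d0 - 1 : Nat) : Int) = gI s lo - 1 := by omega
        omega
      omega
  have hhigh : reachT n s d0 = v - 1 := by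
    have h1 := (g_eq_iff_reach n s d0 (v - 1) hd01 (by omega) (by omega)).1
        (by rw [hblock (v - 1) (by omega) (by omega)]; exact hd0c.symm)
    by_cases hv : v = m + 1
    · have h2 : reachT n s d0 ≤ m := hm ▸ reach_le_full n s d0
      omega
    · have hg : gI s lo < gI s v := by
        rcases hright with h | h
        · exact absurd h hv
        · exact h
      have h2 : ¬ (v ≤ reachT n s d0) := by
        rw [← g_le_iff_reach n s d0 v (by omega) (by omega)]
        omega
      omega
  have hFd : Fday n s (d0 - 1) = PySem.List.pyRange (lo : Int) (v : Int) 1 := by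
    rw [Fday, if_neg (by rw [show d0 - 1 + 1 = d0 by omega, hhigh, hlow]; omega)]
    rw [show d0 - 1 + 1 = d0 by omega, hhigh, hlow]
    congr 1 <;> omega
  have hdlt : gI s lo < dnew := by
    by_cases h : v = m + 1
    · rw [hdnew, if_pos h]; omega
    · rw [hdnew, if_neg h]
      rcases hright with h' | h'
      · exact absurd h' h
      · omega
  rw [partialAns, PySem.List.pySetD_of_nonneg _ _ (by omega), set_mapRange]
  apply List.map_congr_left
  intro u hu
  simp only [List.mem_range] at hu
  by_cases he : u = (gI s lo - 1).toNat
  · rw [if_pos he]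
    have hu1 : (u : Int) + 1 = gI s lo := by omega
    rw [if_pos (by omega)]
    have : u = d0 - 1 := by omega
    rw [this] at *
    exact hFd.symm
  · rw [if_neg he]
    by_cases hlt : (u : Int) + 1 < gI s lo
    · rw [if_pos hlt, if_pos (by omega)]
    · have hgt : gI s lo < (u : Int) + 1 := by
        rcases lt_or_eq_of_le (not_lt.1 hlt) with h | h
        · exact h
        · exfalso; apply he; omega
      rw [if_neg (by omega)]
      by_cases hlt2 : (u : Int) + 1 < dnew
      · rw [if_pos hlt2]
        symm
        apply Fday_eq_neg1
        intro w hw1 hw2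
        by_cases hwlo : w < lo
        · have : gI s w ≤ gI s lo := g_mono s (by omega)
          omega
        · by_cases hwv : w < v
          · rw [hblock w (by omega) hwv]; omega
          · have hvm' : v ≤ m := by omega
            have h3 : gI s v ≤ gI s w := g_mono s (by omega)
            have h4 : dnew = gI s v := by
              rw [hdnew, if_neg (by omega)]
            omega
      · rw [if_neg hlt2]

theorem B_group (n : Nat) (s : List Int) (hlen : s.length = n)
    (m : Nat) (hm : m = reachT n s s.length) :
    ∀ (k v lo : Nat), m + 1 - v = k → 2 ≤ v → v ≤ m + 1 → 1 ≤ lo → lo < v →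
    (∀ u, lo ≤ u → u < v → gI s u = gI s lo) →
    (lo = 1 ∨ gI s (lo - 1) < gI s lo) →
    ∃ loF : Nat,
      (PySem.List.pyRange (v : Int) ((m : Int) + 1) 1).foldl
          (altGroupStep ((List.range m).map (fun i : Nat => gI s (i + 1))))
          (partialAns n s (gI s lo), (lo : Int))
        = (partialAns n s (gI s loF), (loF : Int))
      ∧ 1 ≤ loF ∧ loF ≤ m ∧ (∀ u, loF ≤ u → u ≤ m → gI s u = gI s loF)
      ∧ (loF = 1 ∨ gI s (loF - 1) < gI s loF) := by
  intro k
  induction k with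
  | zero =>
    intro v lo hk h2v hvm hlo1 hlov hblock hleft
    have hv : v = m + 1 := by omega
    rw [hv, PySem.List.pyRange_one_eq_nil (by omega), List.foldl_nil]
    exact ⟨lo, rfl, hlo1, by omega, fun u hu1 hu2 => hblock u hu1 (by omega), hleft⟩
  | succ k ihk =>
    intro v lo hk h2v hvm hlo1 hlov hblock hleft
    have hvlt : v ≤ m := by omega
    rw [PySem.List.pyRange_one_cons (by omega), List.foldl_cons]
    have hgv := getD_gList n s m hm v (by omega) (by omega)
    have hglo := getD_gList n s m hm lo (by omega) (by omega)
    by_cases hne : gI s v = gI s lo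
    · -- same day: state unchanged, block grows
      have hstep : altGroupStep ((List.range m).map (fun i : Nat => gI s (i + 1)))
            (partialAns n s (gI s lo), (lo : Int)) ((v : Int))
          = (partialAns n s (gI s lo), (lo : Int)) := by
        rw [altGroupStep, if_neg]
        simp only [hgv, hglo, hne, ne_eq, not_true_eq_false, not_false_eq_true]
      rw [hstep]
      have hblock' : ∀ u, lo ≤ u → u < v + 1 → gI s u = gI s lo := by
        intro u hu1 hu2
        by_cases hu : u = v
        · subst hu; exact hne
        · exact hblock u hu1 (by omega)
      have := ihk (v + 1) lo (by omega) (by omega) (by omega) hlo1 (by omega) hblock' hleft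
      rwa [show ((v + 1 : Nat) : Int) = (v : Int) + 1 by omega] at this
    · -- new day: close the block
      have hmono : gI s lo ≤ gI s v := g_mono s (by omega)
      have hlt : gI s lo < gI s v := by omega
      have hstep : altGroupStep ((List.range m).map (fun i : Nat => gI s (i + 1)))
            (partialAns n s (gI s lo), (lo : Int)) ((v : Int))
          = (partialAns n s (gI s v), (v : Int)) := by
        rw [altGroupStep, if_pos]
        · rw [hglo]
          rw [write_block n s hlen m hm lo v hlo1 hlov (by omega) hblock hleft
              (Or.inr hlt) (gI s v) (by rw [if_neg (by omega)])]
        · simp only [hgv, hglo, ne_eq]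
          exact hne
      rw [hstep]
      have hblock' : ∀ u, v ≤ u → u < v + 1 → gI s u = gI s v := by
        intro u hu1 hu2
        have huv : u = v := by omega
        rw [huv]
      have hleft' : v = 1 ∨ gI s (v - 1) < gI s v :=
        Or.inr (by rw [hblock (v - 1) (by omega) (by omega)]; exact hlt)
      have := ihk (v + 1) v (by omega) (by omega) (by omega) (by omega) (by omega)
          hblock' hleft'
      rwa [show ((v + 1 : Nat) : Int) = (v : Int) + 1 by omega] at this

theorem pyRange0_map_const (n : Nat) :
    (PySem.List.pyRange 0 (n : Int) 1).map (fun _ => [(-1 : Int)])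
      = (List.range n).map (fun _ => [(-1 : Int)]) := by
  rw [PySem.List.pyRange_one, List.map_map]
  simp [Function.comp_def]

theorem ans0_eq (n : Nat) (s : List Int) :
    (List.range n).map (fun _ => [(-1 : Int)]) = partialAns n s (gI s 1) := by
  rw [partialAns]
  apply List.map_congr_left
  intro u hu
  by_cases h : (u : Int) + 1 < gI s 1
  · rw [if_pos h]
    symm
    apply Fday_eq_neg1
    intro w hw1 hw2
    have : gI s 1 ≤ gI s w := g_mono s hw1
    omega
  · rw [if_neg h]

theorem partial_all (n : Nat) (s : List Int) :
    partialAns n s ((n : Int) + 1) = (List.range n).map (Fday n s) := by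
  rw [partialAns]
  apply List.map_congr_left
  intro u hu
  simp only [List.mem_range] at hu
  rw [if_pos (by omega)]

theorem all_neg1 (n : Nat) (s : List Int) (hm0 : reachT n s s.length = 0) :
    (List.range n).map (fun _ => [(-1 : Int)]) = (List.range n).map (Fday n s) := by
  apply List.map_congr_left
  intro u hu
  rw [Fday, if_pos]
  have h1 := reach_le_full n s (u + 1)
  have h2 := reach_le_full n s u
  omega

theorem B_final (volumes : List Int) (hpre : Pre_solution volumes) :
    solution_alt volumes
      = (List.range volumes.length).map (Fday volumes.length (wmap volumes.length volumes)) := by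
  rw [solution_alt]
  simp only [PySem.List.len_eq]
  set n := volumes.length with hn
  set s := wmap volumes.length volumes with hs
  have hlen : s.length = n := by rw [hs, hn]; simp [wmap]
  set m := reachT n s s.length with hmdef
  have hfd : (PySem.List.enumerate volumes 1).foldl
        (fun fd p => if PySem.List.pyGetD fd p.2 0 = 0
          then PySem.List.pySetD fd p.2 p.1 else fd)
        (PySem.List.pyRepeat [(0 : Int)] ((n : Int) + 1))
      = fdL n s := by
    have h := B_fdloop volumes hpre volumes [] (by simp)
    simp only [List.length_nil, Nat.cast_zero, zero_add] at h
    rw [show wmap n [] = [] from rfl, fdL_nil] at h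
    exact h
  rw [hfd]
  have hD : altDLoop (fdL n s) (PySem.List.pyRange 1 ((n : Int) + 1) 1) 0 []
      = (List.range m).map (fun i : Nat => gI s (i + 1)) := by
    have h := B_dloop n s hlen (m + 1) 0 (by omega) (by omega)
    simp only [Nat.cast_zero, zero_add, List.range_zero, List.map_nil] at h
    rw [show gI s 0 = 0 from rfl] at h
    exact h
  rw [hD]
  have hglen : ((List.range m).map (fun i : Nat => gI s (i + 1))).length = m := by simp
  rw [hglen]
  by_cases hm0 : m = 0
  · rw [if_pos (by rw [hm0]; simp)]
    rw [hm0]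
    simp only [Nat.cast_zero, zero_add]
    rw [show PySem.List.pyRange 2 1 1 = [] from PySem.List.pyRange_one_eq_nil (by omega),
      List.foldl_nil]
    rw [pyRange0_map_const, all_neg1 n s (by omega)]
  · rw [if_neg (by intro hnil; rw [hnil] at hglen; simp at hglen; omega)]
    have hinit : (PySem.List.pyRange 0 (n : Int) 1).map (fun _ => [(-1 : Int)])
        = partialAns n s (gI s 1) := by
      rw [pyRange0_map_const, ans0_eq]
    rw [hinit]
    have hblock1 : ∀ u, 1 ≤ u → u < 2 → gI s u = gI s 1 := by
      intro u hu1 hu2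
      have : u = 1 := by omega
      rw [this]
    obtain ⟨loF, hfold, hloF1, hloFm, hblockF, hleftF⟩ :=
      B_group n s hlen m hmdef (m + 1 - 2) 2 1 rfl (by omega) (by omega) (by omega)
        (by omega) hblock1 (Or.inl rfl)
    rw [show ((2 : Nat) : Int) = 2 by norm_num] at hfold
    rw [show ((1 : Nat) : Int) = 1 by norm_num] at hfold
    rw [hfold]
    have hgetF := getD_gList n s m hmdef loF hloF1 hloFm
    have hwb := write_block n s hlen m hmdef loF (m + 1) hloF1 (by omega) (by omega)
        (fun u hu1 hu2 => hblockF u hu1 (by omega)) hleftF (Or.inl rfl)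
        ((n : Int) + 1) (by rw [if_pos rfl])
    rw [show (((m + 1 : Nat)) : Int) = (m : Int) + 1 by omega] at hwb
    simp only [hgetF, hwb, partial_all]

theorem solution_spec : Claim_equal_solution := by
  unfold Claim_equal_solution
  intro volumes hdom hpre
  unfold Spec_solution
  rw [A_final volumes hpre, B_final volumes hpre]
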